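-- pv_equiv track=rewrite | github.com/python/miss-islington | miss_islington/util.py | pr_is_awaiting_merge
-- ===== SOURCE A (Python) =====
-- def pr_is_awaiting_merge(pr_labels):
--     label_names = [label["name"] for label in pr_labels]
--     if (
--         "DO-NOT-MERGE" not in label_names
--         and "awaiting merge" in label_names
--         and "CLA not signed" not in label_names
--     ):
--         return True
--     return False
-- ===== SOURCE B (Python) =====
-- def pr_is_awaiting_merge(pr_labels):
--     # Short-circuiting scan: stop immediately at the first blocking label;
--     # otherwise remember whether "awaiting merge" appeared.
--     awaiting = False
--     for label in pr_labels:
--         name = label["name"]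
--         if name in ("DO-NOT-MERGE", "CLA not signed"):
--             return False
--         awaiting = awaiting or name == "awaiting merge"
--     return awaiting
-- ===== Notes on version B (the rewrite author's own statement) =====
-- stated objective: alternative
-- what changed: B replaces A's materialised label_names list with three full membership scans by a single short-circuiting traversal that returns False at the first blocking label without examining the rest, otherwise accumulating whether 'awaiting merge' was seen.
import Mathlib
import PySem

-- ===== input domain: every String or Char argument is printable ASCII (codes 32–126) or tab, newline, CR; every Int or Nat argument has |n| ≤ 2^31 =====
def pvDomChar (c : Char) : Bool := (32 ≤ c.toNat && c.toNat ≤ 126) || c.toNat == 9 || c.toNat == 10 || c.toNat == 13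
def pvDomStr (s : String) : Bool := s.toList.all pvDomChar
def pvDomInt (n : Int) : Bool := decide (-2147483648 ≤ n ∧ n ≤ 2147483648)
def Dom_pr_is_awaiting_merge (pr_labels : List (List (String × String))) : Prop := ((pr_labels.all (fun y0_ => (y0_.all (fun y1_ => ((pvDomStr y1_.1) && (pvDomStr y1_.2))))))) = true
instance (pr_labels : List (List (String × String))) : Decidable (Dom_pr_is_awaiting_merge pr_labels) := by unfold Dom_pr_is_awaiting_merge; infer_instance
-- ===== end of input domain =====

-- ===== PORT A =====
-- Header: B is a short-circuiting scan that stops at the first blocking label, instead of A's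
-- materialised name list with three full membership scans (alternative decomposition).
-- label["name"]: first-match association-list lookup; Pre_ guarantees the key is present, so the default is never used.
def pvLookupName (label : List (String × String)) : String :=
  ((label.find? (fun kv => kv.1 == "name")).map Prod.snd).getD ""

def pr_is_awaiting_merge (pr_labels : List (List (String × String))) : Bool :=
  let label_names := pr_labels.map pvLookupName
  if ¬ label_names.contains "DO-NOT-MERGE"
      ∧ label_names.contains "awaiting merge"
      ∧ ¬ label_names.contains "CLA not signed" then true
  else false

-- ===== PORT B =====
-- the early-returning for-loop of Source B: `return False` on a blocker = stop recursing with false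
def pvAltScan : List (List (String × String)) → Bool → Bool
  | [], awaiting => awaiting
  | l :: ls, awaiting =>
    let name := pvLookupName l
    if name == "DO-NOT-MERGE" || name == "CLA not signed" then false
    else pvAltScan ls (awaiting || name == "awaiting merge")

def pr_is_awaiting_merge_alt (pr_labels : List (List (String × String))) : Bool :=
  pvAltScan pr_labels false

-- ===== PRECONDITION & SPEC =====
-- Pre_ excludes labels without a "name" key, on which Python A raises KeyError.
def Pre_pr_is_awaiting_merge (pr_labels : List (List (String × String))) : Prop :=
  ∀ label ∈ pr_labels, label.any (fun kv => kv.1 == "name")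
instance (pr_labels : List (List (String × String))) : Decidable (Pre_pr_is_awaiting_merge pr_labels) := by
  unfold Pre_pr_is_awaiting_merge; infer_instance
def pvWitness_pr_is_awaiting_merge : (List (List (String × String))) :=
  [[("name", "awaiting merge")], [("name", "bug"), ("color", "red")]]

def Spec_pr_is_awaiting_merge (pr_labels : List (List (String × String))) (out : Bool) : Prop := out = pr_is_awaiting_merge_alt pr_labels
instance (pr_labels : List (List (String × String))) (out : Bool) : Decidable (Spec_pr_is_awaiting_merge pr_labels out) := by
  unfold Spec_pr_is_awaiting_merge; infer_instance

-- ===== CLAIM =====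
def Claim_equal_pr_is_awaiting_merge : Prop := ∀ (pr_labels : List (List (String × String))), Dom_pr_is_awaiting_merge pr_labels → Pre_pr_is_awaiting_merge pr_labels → Spec_pr_is_awaiting_merge pr_labels (pr_is_awaiting_merge pr_labels)

-- ===== LEMMAS AND PROOFS =====
-- Characterisation of the short-circuiting scan: false iff a blocker occurs anywhere,
-- else the accumulator or-ed with the presence of "awaiting merge".
theorem pvAltScan_eq (ls : List (List (String × String))) (aw : Bool) :
    pvAltScan ls aw =
      if (ls.map pvLookupName).contains "DO-NOT-MERGE"
          || (ls.map pvLookupName).contains "CLA not signed" then false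
      else aw || (ls.map pvLookupName).contains "awaiting merge" := by
  induction ls generalizing aw with
  | nil => simp [pvAltScan]
  | cons l ls ih =>
    simp only [pvAltScan, List.map_cons, List.contains_cons]
    by_cases h1 : pvLookupName l = "DO-NOT-MERGE"
    · simp [h1]
    · by_cases h2 : pvLookupName l = "CLA not signed"
      · simp [h2]
      · have e1 : (pvLookupName l == "DO-NOT-MERGE") = false := by
          simp [beq_eq_false_iff_ne, h1]
        have e2 : (pvLookupName l == "CLA not signed") = false := by
          simp [beq_eq_false_iff_ne, h2]
        have e1' : ("DO-NOT-MERGE" == pvLookupName l) = false := by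
          simp only [beq_eq_false_iff_ne]; exact fun h => h1 h.symm
        have e2' : ("CLA not signed" == pvLookupName l) = false := by
          simp only [beq_eq_false_iff_ne]; exact fun h => h2 h.symm
        rw [ih]
        simp [e1, e2, e1', e2', BEq.comm, Bool.or_assoc]

-- ===== VERDICT =====
theorem pr_is_awaiting_merge_spec : Claim_equal_pr_is_awaiting_merge := by
  intro pr_labels _ _
  unfold Spec_pr_is_awaiting_merge pr_is_awaiting_merge pr_is_awaiting_merge_alt
  rw [pvAltScan_eq]
  simp only [Bool.false_or]
  generalize (pr_labels.map pvLookupName).contains "DO-NOT-MERGE" = a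
  generalize (pr_labels.map pvLookupName).contains "awaiting merge" = b
  generalize (pr_labels.map pvLookupName).contains "CLA not signed" = c
  cases a <;> cases b <;> cases c <;> simp
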